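-- pv_equiv track=rewrite | github.com/nebneuron/neural-ideal | PythonCode/GeneratingSetToCF.py | indicators
-- ===== SOURCE A (Python) =====
-- def indicator(c):
--     for i in range(len(c)):
--         if c[i] == 1:
--             c[i] = 0
--         elif c[i] == 0:
--             c[i] = 1
--         else:
--             assert(False)
--     return c
--
-- def indicators(C):
--     assert len(C) != 0
--     complement = []
--     for c in complete_code(len(C[0])):
--         if not c in C:
--             complement = complement+[c]
--     indicators = []
--     for c in complement:
--         indicators = indicators + [indicator(c)]
--     return indicators
--
-- def complete_code(n):
--     if n==1:
--         return [[0],[1]]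
--     else:
--         X=[]
--         for i in complete_code(n-1):
--             X=X+[i+[0]]
--         for i in complete_code(n-1):
--             X=X+[i+[1]]
--         return X
-- ===== SOURCE B (Python) =====
-- def indicators(C):
--     assert len(C) != 0
--     n = len(C[0])
--     out = []
--     for k in range(2 ** n):
--         vec = [(k >> j) & 1 for j in range(n)]
--         if vec not in C:
--             out.append([1 - b for b in vec])
--     return out
-- ===== Notes on version B (the rewrite author's own statement) =====
-- stated objective: simpler
-- what changed: Replaces the exponential recursive complete_code enumeration plus two separate filter/flip passes with a single loop over integers 0..2^n-1 that derives each codeword's bits from the integer (bit j of k at position j) and appends the arithmetically flipped vector in the same pass.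
import Mathlib
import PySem

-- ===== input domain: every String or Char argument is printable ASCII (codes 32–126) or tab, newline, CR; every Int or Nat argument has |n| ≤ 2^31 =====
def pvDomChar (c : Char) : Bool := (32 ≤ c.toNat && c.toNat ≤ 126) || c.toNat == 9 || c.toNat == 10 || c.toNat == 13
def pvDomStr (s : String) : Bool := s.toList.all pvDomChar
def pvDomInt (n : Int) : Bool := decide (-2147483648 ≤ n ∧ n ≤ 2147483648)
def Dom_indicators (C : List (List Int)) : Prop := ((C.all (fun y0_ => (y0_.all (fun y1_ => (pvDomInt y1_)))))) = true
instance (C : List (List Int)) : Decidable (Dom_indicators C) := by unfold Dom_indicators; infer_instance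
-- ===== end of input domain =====

-- B replaces the recursive complete_code enumeration and separate filter/flip passes with one
-- closed-form loop over integers 0..2^n-1 deriving each codeword's bits from the integer (simpler).


-- ===== PORT A =====
-- indicator(c): flips each entry 1↦0, 0↦1 in place; the Python 'assert False' branch is
-- unreachable in indicators (it is only applied to complete_code vectors, whose entries are
-- 0/1), ported here as leaving such an entry unchanged.
def indicatorA : List Int → List Int
  | [] => []
  | x :: xs => (if x = 1 then 0 else if x = 0 then 1 else x) :: indicatorA xs

-- complete_code(n); Python diverges for n ≤ 0 (excluded by Pre_), the 0 case is a placeholder.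
def completeCode : Nat → List (List Int)
  | 0 => []
  | 1 => [[0], [1]]
  | Nat.succ (Nat.succ n) =>
      let prev := completeCode (n + 1)
      let X := prev.foldl (fun X i => X ++ [i ++ [0]]) []
      prev.foldl (fun X i => X ++ [i ++ [1]]) X

def indicators (C : List (List Int)) : List (List Int) :=
  let complement := (completeCode C.headI.length).foldl
      (fun comp c => if C.contains c then comp else comp ++ [c]) []
  complement.foldl (fun ind c => ind ++ [indicatorA c]) []

-- ===== PORT B =====
def indicators_alt (C : List (List Int)) : List (List Int) :=
  let n := C.headI.length
  (List.range (2 ^ n)).foldl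
    (fun out k =>
      let vec := (List.range n).map (fun j => (((k >>> j) &&& 1 : Nat) : Int))
      if C.contains vec then out else out ++ [vec.map (fun b => 1 - b)]) []

-- ===== PRECONDITION & SPEC =====
-- Pre_ excludes exactly the inputs where Python A raises: C = [] (AssertionError) and
-- C[0] = [] (complete_code(0) recurses forever: RecursionError).
def Pre_indicators (C : List (List Int)) : Prop := C ≠ [] ∧ C.headI ≠ []
instance (C : List (List Int)) : Decidable (Pre_indicators C) := by unfold Pre_indicators; infer_instance
def pvWitness_indicators : List (List Int) := [[0]]

def Spec_indicators (C : List (List Int)) (out : List (List Int)) : Prop := out = indicators_alt C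
instance (C : List (List Int)) (out : List (List Int)) : Decidable (Spec_indicators C out) := by unfold Spec_indicators; infer_instance

-- ===== CLAIM (what is proved, stated in full; the proofs are below) =====
def Claim_equal_indicators : Prop := ∀ (C : List (List Int)), Dom_indicators C → Pre_indicators C → Spec_indicators C (indicators C)

-- ===== LEMMAS AND PROOFS =====
def bits (n k : Nat) : List Int := (List.range n).map (fun j => (((k >>> j) &&& 1 : Nat) : Int))

theorem foldl_append_map {α β : Type} (f : α → β) :
    ∀ (l : List α) (acc : List β),
      l.foldl (fun acc c => acc ++ [f c]) acc = acc ++ l.map f := by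
  intro l
  induction l with
  | nil => simp
  | cons x xs ih => intro acc; simp [List.foldl, ih]

theorem bits_succ (n k : Nat) :
    bits (n + 1) k = bits n k ++ [(((k >>> n) &&& 1 : Nat) : Int)] := by
  simp [bits, List.range_succ]

theorem shift_mod (k j : Nat) : (k >>> j) &&& 1 = k / 2 ^ j % 2 := by
  simp [Nat.shiftRight_eq_div_pow, Nat.and_one_is_mod]

theorem bit_top_zero (n k : Nat) (h : k < 2 ^ n) : (k >>> n) &&& 1 = 0 := by
  rw [shift_mod, Nat.div_eq_of_lt h]

theorem bit_top_one (n k : Nat) (h : k < 2 ^ n) : ((2 ^ n + k) >>> n) &&& 1 = 1 := by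
  rw [shift_mod, Nat.add_comm, Nat.add_div_right _ (Nat.two_pow_pos n), Nat.div_eq_of_lt h]

theorem bit_low (n j k : Nat) (h : j < n) :
    ((2 ^ n + k) >>> j) &&& 1 = (k >>> j) &&& 1 := by
  rw [shift_mod, shift_mod]
  have h2 : 2 ^ n = 2 ^ j * 2 ^ (n - j) := by
    rw [← pow_add]; congr 1; omega
  rw [h2, Nat.mul_add_div (Nat.two_pow_pos j)]
  have h3 : 2 ^ (n - j) % 2 = 0 := by
    have he : n - j = (n - j - 1) + 1 := by omega
    rw [he, pow_succ]; simp
  omega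

theorem bits_add_pow (n k : Nat) : bits n (2 ^ n + k) = bits n k := by
  unfold bits
  apply List.map_congr_left
  intro j hj
  rw [List.mem_range] at hj
  rw [bit_low n j k hj]

theorem completeCode_eq : ∀ n : Nat, completeCode (n + 1) = (List.range (2 ^ (n + 1))).map (bits (n + 1)) := by
  intro n
  induction n with
  | zero => decide
  | succ m ih =>
      show completeCode (m + 2) = _
      rw [completeCode]
      simp only [foldl_append_map]
      rw [ih]
      have hsplit : 2 ^ (m + 2) = 2 ^ (m + 1) + 2 ^ (m + 1) := by ring
      rw [hsplit, List.range_add, List.map_append, List.map_map, List.map_map, List.map_map]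
      simp only [List.nil_append]
      congr 1
      · apply List.map_congr_left
        intro k hk
        rw [List.mem_range] at hk
        simp only [Function.comp]
        rw [bits_succ (m + 1) k, bit_top_zero _ _ hk]
        norm_num
      · apply List.map_congr_left
        intro k hk
        rw [List.mem_range] at hk
        simp only [Function.comp]
        rw [bits_succ (m + 1) (2 ^ (m + 1) + k), bits_add_pow (m + 1) k, bit_top_one _ _ hk]
        norm_num

theorem indicatorA_map {α : Type} (g : α → Int) (l : List α)
    (h : ∀ a ∈ l, g a = 0 ∨ g a = 1) :
    indicatorA (l.map g) = l.map (fun a => 1 - g a) := by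
  induction l with
  | nil => rfl
  | cons x xs ih =>
      have hx := h x (by simp)
      simp only [List.map_cons, indicatorA]
      rw [ih (fun a ha => h a (by simp [ha]))]
      rcases hx with h0 | h0 <;> simp [h0]

theorem indicatorA_bits (n k : Nat) :
    indicatorA (bits n k) = (bits n k).map (fun b => 1 - b) := by
  unfold bits
  have hb : ∀ j ∈ List.range n, (((k >>> j) &&& 1 : Nat) : Int) = 0 ∨ (((k >>> j) &&& 1 : Nat) : Int) = 1 := by
    intro j _
    rw [shift_mod]
    rcases Nat.mod_two_eq_zero_or_one (k / 2 ^ j) with h | h <;> rw [h] <;> simp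
  rw [indicatorA_map _ _ hb, List.map_map]
  simp [Function.comp_def]

-- A's complement loop as a filter (stated in exactly the unfolded loop's shape)
theorem A_complement (C : List (List Int)) :
    ∀ (l : List (List Int)) (acc : List (List Int)),
      l.foldl (fun comp c => if C.contains c then comp else comp ++ [c]) acc
        = acc ++ l.filter (fun c => !C.contains c) := by
  intro l
  induction l with
  | nil => simp
  | cons x xs ih =>
      intro acc
      simp only [List.foldl_cons, List.filter_cons, List.contains_eq_mem,
        decide_eq_true_eq, Bool.not_eq_true', decide_eq_false_iff_not] at ih ⊢
      by_cases h : x ∈ C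
      · rw [if_pos h, if_neg (not_not_intro h)]
        exact ih acc
      · rw [if_neg h, if_pos h, ih (acc ++ [x]), List.append_assoc]
        rfl

-- B's single loop as filter-then-map (stated in exactly the unfolded loop's shape)
theorem B_fold (C : List (List Int)) (n : Nat) :
    ∀ (l : List Nat) (acc : List (List Int)),
      l.foldl
        (fun out k =>
          if C.contains ((List.range n).map (fun j => (((k >>> j) &&& 1 : Nat) : Int))) then out
          else out ++ [((List.range n).map (fun j => (((k >>> j) &&& 1 : Nat) : Int))).map (fun b => 1 - b)]) acc
        = acc ++ (l.filter (fun k => !C.contains (bits n k))).map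
            (fun k => (bits n k).map (fun b => 1 - b)) := by
  intro l
  induction l with
  | nil => simp
  | cons x xs ih =>
      intro acc
      simp only [List.foldl_cons, List.filter_cons, List.contains_eq_mem, bits,
        decide_eq_true_eq, Bool.not_eq_true', decide_eq_false_iff_not] at ih ⊢
      by_cases h : (List.range n).map (fun j => (((x >>> j) &&& 1 : Nat) : Int)) ∈ C
      · rw [if_pos h, if_neg (not_not_intro h)]
        exact ih acc
      · rw [if_neg h, if_pos h, ih _, List.append_assoc]
        rfl

-- A's filtered-and-flipped enumeration equals B's normal form
theorem A_side (C : List (List Int)) (n : Nat) :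
    ∀ (l : List Nat),
      ((l.map (bits n)).filter (fun c => !C.contains c)).map indicatorA
        = (l.filter (fun k => !C.contains (bits n k))).map
            (fun k => (bits n k).map (fun b => 1 - b)) := by
  intro l
  induction l with
  | nil => rfl
  | cons x xs ih =>
      simp only [List.map_cons, List.filter_cons, List.contains_eq_mem,
        Bool.not_eq_true', decide_eq_false_iff_not] at ih ⊢
      by_cases h : bits n x ∈ C
      · rw [if_neg (not_not_intro h), if_neg (not_not_intro h)]
        exact ih
      · rw [if_pos h, if_pos h, List.map_cons, List.map_cons, indicatorA_bits, ih]

-- ===== VERDICT (by name: the statement is the Claim_ definition above) =====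
theorem indicators_spec : Claim_equal_indicators := by
  intro C _ hpre
  obtain ⟨hC, hh⟩ := hpre
  obtain ⟨m, hm⟩ : ∃ m, C.headI.length = m + 1 := by
    cases h : C.headI with
    | nil => exact absurd h hh
    | cons a l => exact ⟨l.length, by simp⟩
  unfold Spec_indicators indicators indicators_alt
  simp only [hm]
  rw [completeCode_eq m, A_complement, foldl_append_map indicatorA, B_fold C (m + 1)]
  simp only [List.nil_append]
  exact A_side C (m + 1) (List.range (2 ^ (m + 1)))
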